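-- pv_equiv track=rewrite | github.com/wherby/code | contest/00000c490d177/c496/q1/t1.py | mirrorFrequency
-- ===== SOURCE A (Python) =====
-- from collections import Counter
--
-- def mirrorFrequency(s: str) -> int:
--     c = Counter(s)
--     acc = 0
--     vis ={}
--     for k,v in c.items():
--         if k in vis:
--             continue
--         if ord(k)<=ord("z") and ord(k)>=ord("a"):
--             op = chr(ord("a")+ (ord("z") - ord(k)))
--             acc += abs(v- c[op])
--         else:
--             op = str(9- int(k))
--             acc += abs(v-c[op])
--         vis[k]=vis[op]=1
--     return acc
-- ===== SOURCE B (Python) =====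
-- from collections import Counter
--
-- def mirrorFrequency(s: str) -> int:
--     c = Counter(s)
--     total = 0
--     for k in "abcdefghijklmnopqrstuvwxyz0123456789":
--         if k.isalpha():
--             op = chr(ord("a") + ord("z") - ord(k))
--         else:
--             op = chr(ord("0") + ord("9") - ord(k))
--         total += abs(c[k] - c[op])
--     return total // 2
-- ===== Notes on version B (the rewrite author's own statement) =====
-- stated objective: simpler
-- what changed: B drops A's visited-dict pair bookkeeping over the counter's keys and instead scans the fixed 36-character alphabet once, adding |c[k]-c[mirror(k)]| for every character (each mirror pair counted twice) and returning the total halved.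
import Mathlib
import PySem

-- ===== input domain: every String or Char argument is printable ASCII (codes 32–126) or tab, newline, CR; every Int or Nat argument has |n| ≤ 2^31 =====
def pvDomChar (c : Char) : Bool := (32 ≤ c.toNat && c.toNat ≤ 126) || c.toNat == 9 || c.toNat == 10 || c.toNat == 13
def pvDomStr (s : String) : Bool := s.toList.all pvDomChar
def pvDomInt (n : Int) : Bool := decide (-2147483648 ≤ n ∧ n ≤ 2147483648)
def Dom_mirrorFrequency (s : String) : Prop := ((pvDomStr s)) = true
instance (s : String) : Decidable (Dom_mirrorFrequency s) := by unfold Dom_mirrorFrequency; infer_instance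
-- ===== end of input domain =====

-- B replaces A's visited-dict bookkeeping over the counter's keys by a single scan of the
-- fixed 36-char alphabet, counting each mirror pair twice and halving (objective: simpler).

-- ===== PORT A =====
-- op-computation of A's loop body: chr(ord("a")+(ord("z")-ord(k))) for lowercase k,
-- else str(9 - int(k)) (none = ValueError from int(k)); within ASCII, int(k) succeeds only on
-- a digit char, so 9 - int(k) is in 0..9 and str of it is a single char (headD is exact there).
def pvOpA (k : Char) : Option Char :=
  if k.toNat ≤ 'z'.toNat ∧ 'a'.toNat ≤ k.toNat then
    some (Char.ofNat ('a'.toNat + ('z'.toNat - k.toNat)))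
  else
    (PySem.Int.ofStr? (String.mk [k])).map (fun n => (PySem.Int.toStr (9 - n)).toList.headD k)

-- one iteration of A's loop; state none = a ValueError was raised
def pvStepA (c : PySem.Dict Char Int) (st : Option (Int × PySem.Dict Char Int))
    (kv : Char × Int) : Option (Int × PySem.Dict Char Int) :=
  match st with
  | none => none
  | some (acc, vis) =>
    if vis.contains kv.1 then some (acc, vis)
    else
      match pvOpA kv.1 with
      | none => none
      | some op => some (acc + |kv.2 - c.getD op 0|, (vis.insert kv.1 1).insert op 1)

-- the whole loop over c.items, then 'return acc' (none = a raised ValueError)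
def pvRunA (c : PySem.Dict Char Int) : Int :=
  ((c.items.foldl (pvStepA c) (some ((0 : Int), (PySem.Dict.empty : PySem.Dict Char Int)))).map
    (fun p => p.1)).getD 0

def mirrorFrequency (s : String) : Int :=
  pvRunA (PySem.Dict.counter s.toList)

-- ===== PORT B =====
-- op of B's loop body: the alphabet complement for a letter, the digit complement otherwise
def pvOpB (k : Char) : Char :=
  if PySem.Chars.isalpha k then Char.ofNat ('a'.toNat + 'z'.toNat - k.toNat)
  else Char.ofNat ('0'.toNat + '9'.toNat - k.toNat)

-- B's loop over the fixed alphabet, then 'return total // 2'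
def pvRunB (c : PySem.Dict Char Int) : Int :=
  PySem.Int.floordiv
    ("abcdefghijklmnopqrstuvwxyz0123456789".toList.foldl
      (fun total k => total + |c.getD k 0 - c.getD (pvOpB k) 0|) 0) 2

def mirrorFrequency_alt (s : String) : Int :=
  pvRunB (PySem.Dict.counter s.toList)

-- ===== PRECONDITION & SPEC =====
-- Pre_ admits exactly the inputs on which A returns: every character a lowercase ASCII letter
-- or a decimal digit; on any other character A's int(k) raises ValueError.
def Pre_mirrorFrequency (s : String) : Prop :=
  s.toList.all (fun c => "abcdefghijklmnopqrstuvwxyz0123456789".toList.contains c) = true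
instance (s : String) : Decidable (Pre_mirrorFrequency s) := by
  unfold Pre_mirrorFrequency; infer_instance

def pvWitness_mirrorFrequency : String := "az09z"

def Spec_mirrorFrequency (s : String) (out : Int) : Prop := out = mirrorFrequency_alt s
instance (s : String) (out : Int) : Decidable (Spec_mirrorFrequency s out) := by
  unfold Spec_mirrorFrequency; infer_instance

-- ===== CLAIM (what is proved, stated in full; the proofs are below) =====
def Claim_equal_mirrorFrequency : Prop :=
  ∀ (s : String), Dom_mirrorFrequency s → Pre_mirrorFrequency s →
    Spec_mirrorFrequency s (mirrorFrequency s)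

-- ===== LEMMAS AND PROOFS =====

def pvAlph : List Char := "abcdefghijklmnopqrstuvwxyz0123456789".toList

-- the mirror map, proof-side
def pvMir (k : Char) : Char :=
  if 'a' ≤ k ∧ k ≤ 'z' then Char.ofNat ('a'.toNat + ('z'.toNat - k.toNat))
  else Char.ofNat ('0'.toNat + ('9'.toNat - k.toNat))

-- per-pair contribution |count k - count (mirror k)|
def pvF (s : String) (k : Char) : Int :=
  |(s.toList.count k : Int) - (s.toList.count (pvMir k) : Int)|

lemma pvMir_mem : ∀ k ∈ pvAlph, pvMir k ∈ pvAlph := by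
  have h : (pvAlph.all fun k => decide (pvMir k ∈ pvAlph)) = true := by rfl
  intro k hk; exact of_decide_eq_true (List.all_eq_true.mp h k hk)
lemma pvMir_invol : ∀ k ∈ pvAlph, pvMir (pvMir k) = k := by
  have h : (pvAlph.all fun k => decide (pvMir (pvMir k) = k)) = true := by rfl
  intro k hk; exact of_decide_eq_true (List.all_eq_true.mp h k hk)
lemma pvMir_ne : ∀ k ∈ pvAlph, pvMir k ≠ k := by
  have h : (pvAlph.all fun k => decide (pvMir k ≠ k)) = true := by rfl
  intro k hk; exact of_decide_eq_true (List.all_eq_true.mp h k hk)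
lemma pvOpA_eq : ∀ k ∈ pvAlph, pvOpA k = some (pvMir k) := by
  have h : (pvAlph.all fun k => decide (pvOpA k = some (pvMir k))) = true := by rfl
  intro k hk; exact of_decide_eq_true (List.all_eq_true.mp h k hk)
lemma pvOpB_eq : ∀ k ∈ pvAlph, pvOpB k = pvMir k := by
  have h : (pvAlph.all fun k => decide (pvOpB k = pvMir k)) = true := by rfl
  intro k hk; exact of_decide_eq_true (List.all_eq_true.mp h k hk)
set_option maxRecDepth 8000 in
lemma pvAlph_nodup : pvAlph.Nodup := by decide

lemma pvF_mir (s : String) (k : Char) (hk : k ∈ pvAlph) : pvF s (pvMir k) = pvF s k := by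
  unfold pvF
  rw [pvMir_invol k hk, abs_sub_comm]

-- remaining pair sum: mirror pairs meeting L and not yet visited, each char counted once
def pvS (s : String) (L : List Char) (vis : PySem.Dict Char Int) : Int :=
  ∑ j ∈ pvAlph.toFinset.filter
      (fun j => vis.contains j = false ∧ (j ∈ L ∨ pvMir j ∈ L)), pvF s j

lemma pvLoopA (s : String) :
    ∀ (L : List Char) (acc : Int) (vis : PySem.Dict Char Int),
      (∀ k ∈ L, k ∈ pvAlph) →
      (∀ j ∈ pvAlph, vis.contains (pvMir j) = vis.contains j) →
      ∃ t vis',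
        (L.map (fun k => (k, (s.toList.count k : Int)))).foldl
            (pvStepA (PySem.Dict.counter s.toList)) (some (acc, vis)) = some (acc + t, vis')
        ∧ 2 * t = pvS s L vis := by
  intro L
  induction L with
  | nil =>
    intro acc vis _ _
    refine ⟨0, vis, by simp, ?_⟩
    unfold pvS
    rw [Finset.sum_filter]
    simp
  | cons k L ih =>
    intro acc vis hmem hclos
    have hk : k ∈ pvAlph := hmem k (List.mem_cons_self ..)
    by_cases hvk : vis.contains k = true
    · -- already visited: skip
      have hstep : pvStepA (PySem.Dict.counter s.toList) (some (acc, vis))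
          (k, (s.toList.count k : Int)) = some (acc, vis) := by
        simp [pvStepA, hvk]
      obtain ⟨t, vis', hfold, hsum⟩ := ih acc vis (fun j hj => hmem j (List.mem_cons_of_mem _ hj)) hclos
      refine ⟨t, vis', by simpa [hstep] using hfold, ?_⟩
      have heq : pvS s (k :: L) vis = pvS s L vis := by
        unfold pvS
        apply Finset.sum_congr
        · apply Finset.filter_congr
          intro j hj
          simp only [List.mem_toFinset] at hj
          constructor
          · rintro ⟨hcj, hor⟩
            refine ⟨hcj, ?_⟩
            rcases hor with h | h
            · rcases List.mem_cons.mp h with rfl | h'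
              · rw [hvk] at hcj; cases hcj
              · exact Or.inl h'
            · rcases List.mem_cons.mp h with he | h'
              · exfalso
                have hcl := hclos j hj
                rw [he, hvk] at hcl
                rw [← hcl] at hcj; cases hcj
              · exact Or.inr h'
          · rintro ⟨hcj, hor⟩
            refine ⟨hcj, ?_⟩
            rcases hor with h | h
            · exact Or.inl (List.mem_cons_of_mem _ h)
            · exact Or.inr (List.mem_cons_of_mem _ h)
        · intro j _; rfl
      rw [heq]; exact hsum
    · -- fresh key: add |v - c[op]| and mark k and its mirror
      have hvk' : vis.contains k = false := by simpa using hvk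
      have hstep : pvStepA (PySem.Dict.counter s.toList) (some (acc, vis))
          (k, (s.toList.count k : Int))
          = some (acc + pvF s k, (vis.insert k 1).insert (pvMir k) 1) := by
        simp only [pvStepA, hvk', pvOpA_eq k hk]
        simp [PySem.Dict.getD_counter, pvF]
      set vis₂ := (vis.insert k 1).insert (pvMir k) 1 with hvis₂
      have hc₂ : ∀ x, vis₂.contains x = (x == pvMir k || (x == k || vis.contains x)) := by
        intro x
        rw [hvis₂, PySem.Dict.contains_insert, PySem.Dict.contains_insert]
      have hmk : pvMir k ∈ pvAlph := pvMir_mem k hk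
      have hclos₂ : ∀ j ∈ pvAlph, vis₂.contains (pvMir j) = vis₂.contains j := by
        intro j hj
        have h1 : (pvMir j = pvMir k) ↔ (j = k) := by
          constructor
          · intro h
            have := congrArg pvMir h
            rwa [pvMir_invol j hj, pvMir_invol k hk] at this
          · intro h; rw [h]
        have h2 : (pvMir j = k) ↔ (j = pvMir k) := by
          constructor
          · intro h
            have := congrArg pvMir h
            rwa [pvMir_invol j hj] at this
          · intro h; rw [h, pvMir_invol k hk]
        rw [hc₂, hc₂, hclos j hj, Bool.eq_iff_iff]
        simp only [Bool.or_eq_true, beq_iff_eq, h1, h2]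
        tauto
      obtain ⟨t', vis'', hfold, hsum⟩ :=
        ih (acc + pvF s k) vis₂ (fun j hj => hmem j (List.mem_cons_of_mem _ hj)) hclos₂
      refine ⟨pvF s k + t', vis'', ?_, ?_⟩
      · rw [List.map_cons, List.foldl_cons, hstep]
        rw [hfold]; ring_nf
      · -- pvS s (k::L) vis = 2 * pvF s k + pvS s L vis₂
        have hset : pvAlph.toFinset.filter
              (fun j => vis.contains j = false ∧ (j ∈ k :: L ∨ pvMir j ∈ k :: L))
            = insert k (insert (pvMir k)
                (pvAlph.toFinset.filter
                  (fun j => vis₂.contains j = false ∧ (j ∈ L ∨ pvMir j ∈ L)))) := by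
          apply Finset.ext
          intro j
          simp only [Finset.mem_insert, Finset.mem_filter, List.mem_toFinset, List.mem_cons]
          constructor
          · rintro ⟨hj, hcj, hor⟩
            by_cases e1 : j = k
            · exact Or.inl e1
            by_cases e2 : j = pvMir k
            · exact Or.inr (Or.inl e2)
            refine Or.inr (Or.inr ⟨hj, ?_, ?_⟩)
            · rw [hc₂, show (j == pvMir k) = false from beq_eq_false_iff_ne.mpr e2,
                show (j == k) = false from beq_eq_false_iff_ne.mpr e1]
              simpa using hcj
            · have hmjk : pvMir j ≠ k := fun h => e2 (by
                have := congrArg pvMir h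
                rwa [pvMir_invol j hj] at this)
              have hmjmk : pvMir j ≠ pvMir k := fun h => e1 (by
                have := congrArg pvMir h
                rwa [pvMir_invol j hj, pvMir_invol k hk] at this)
              rcases hor with (h | h) | (h | h)
              · exact absurd h e1
              · exact Or.inl h
              · exact absurd h hmjk
              · exact Or.inr h
          · rintro (rfl | rfl | ⟨hj, hcj, hor⟩)
            · exact ⟨hk, hvk', Or.inl (Or.inl rfl)⟩
            · refine ⟨hmk, ?_, Or.inr (Or.inl (pvMir_invol k hk))⟩
              rw [hclos k hk]; exact hvk'
            · refine ⟨hj, ?_, ?_⟩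
              · rw [hc₂] at hcj
                rcases Bool.or_eq_false_iff.mp hcj with ⟨_, h⟩
                exact (Bool.or_eq_false_iff.mp h).2
              · rcases hor with h | h
                · exact Or.inl (Or.inr h)
                · exact Or.inr (Or.inr h)
        have hknotin : k ∉ insert (pvMir k)
            (pvAlph.toFinset.filter
              (fun j => vis₂.contains j = false ∧ (j ∈ L ∨ pvMir j ∈ L))) := by
          simp only [Finset.mem_insert, Finset.mem_filter]
          rintro (h | ⟨_, hcj, _⟩)
          · exact pvMir_ne k hk h.symm
          · rw [hc₂] at hcj
            simp at hcj
        have hmknotin : pvMir k ∉ pvAlph.toFinset.filter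
              (fun j => vis₂.contains j = false ∧ (j ∈ L ∨ pvMir j ∈ L)) := by
          simp only [Finset.mem_filter]
          rintro ⟨_, hcj, _⟩
          rw [hc₂] at hcj
          simp at hcj
        have hS : pvS s (k :: L) vis = pvF s k + (pvF s (pvMir k) + pvS s L vis₂) := by
          unfold pvS
          rw [hset, Finset.sum_insert hknotin, Finset.sum_insert hmknotin]
        rw [hS, pvF_mir s k hk, ← hsum]
        ring

lemma pvA_eq (s : String) (hpre : Pre_mirrorFrequency s) :
    2 * mirrorFrequency s = ∑ j ∈ pvAlph.toFinset, pvF s j := by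
  have hmem : ∀ k ∈ PySem.Set.ofList s.toList, k ∈ pvAlph := by
    intro k hkm
    have hk := List.all_eq_true.mp hpre k ((PySem.Set.mem_ofList s.toList k).mp hkm)
    unfold pvAlph
    simpa [List.contains_iff_mem] using hk
  have hclos : ∀ j ∈ pvAlph,
      (PySem.Dict.empty : PySem.Dict Char Int).contains (pvMir j)
        = (PySem.Dict.empty : PySem.Dict Char Int).contains j := by
    intro j _
    rw [PySem.Dict.contains_empty, PySem.Dict.contains_empty]
  obtain ⟨t, vis', hfold, hsum⟩ := pvLoopA s (PySem.Set.ofList s.toList) 0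
    (PySem.Dict.empty : PySem.Dict Char Int) hmem hclos
  have hA : mirrorFrequency s = t := by
    unfold mirrorFrequency pvRunA
    rw [PySem.Dict.items_counter, hfold]
    simp
  rw [hA, hsum]
  unfold pvS
  rw [Finset.sum_filter]
  apply Finset.sum_congr rfl
  intro j _
  by_cases h : j ∈ PySem.Set.ofList s.toList ∨ pvMir j ∈ PySem.Set.ofList s.toList
  · rw [if_pos ⟨PySem.Dict.contains_empty j, h⟩]
  · rw [if_neg (fun hc => h hc.2)]
    rw [not_or] at h
    have h1 : s.toList.count j = 0 :=
      List.count_eq_zero.mpr (fun hm => h.1 ((PySem.Set.mem_ofList s.toList j).mpr hm))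
    have h2 : s.toList.count (pvMir j) = 0 :=
      List.count_eq_zero.mpr (fun hm => h.2 ((PySem.Set.mem_ofList s.toList (pvMir j)).mpr hm))
    simp [pvF, h1, h2]

lemma pvB_eq (s : String) :
    mirrorFrequency_alt s = PySem.Int.floordiv (∑ j ∈ pvAlph.toFinset, pvF s j) 2 := by
  unfold mirrorFrequency_alt pvRunB
  have hbody : ("abcdefghijklmnopqrstuvwxyz0123456789".toList).foldl
      (fun total k => total + |(PySem.Dict.counter s.toList).getD k 0
        - (PySem.Dict.counter s.toList).getD (pvOpB k) 0|) 0
      = pvAlph.foldl (fun total k => total + pvF s k) 0 := by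
    apply PySem.List.foldl_congr_mem
    intro acc x hx
    rw [pvOpB_eq x hx, PySem.Dict.getD_counter, PySem.Dict.getD_counter]
    rfl
  rw [hbody, PySem.List.foldl_add, List.sum_toFinset (pvF s) pvAlph_nodup]
  simp

-- ===== VERDICT (by name: the statement is the Claim_ definition above) =====
theorem mirrorFrequency_spec : Claim_equal_mirrorFrequency := by
  intro s _ hpre
  unfold Spec_mirrorFrequency
  rw [pvB_eq s, ← pvA_eq s hpre,
    PySem.Int.floordiv_eq_ediv_of_pos (by norm_num : (0:Int) < 2)]
  omega
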